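-- pv_equiv track=rewrite | github.com/tz18/solving_lp | skipleak.py | rule_out_key_letters_from_skips
-- ===== SOURCE A (Python) =====
-- def rule_out_key_letters_from_skips(ordinals, period, skip, skip_indexes):
--     result = [set() for i in range(0,period)]
--     k = 0;
--     for i, a in enumerate(ordinals):
--         if i not in skip_indexes:
--             result[k].add(a-skip)
--             k = (k + 1)%period
--     return result
-- ===== SOURCE B (Python) =====
-- def rule_out_key_letters_from_skips(ordinals, period, skip, skip_indexes):
--     filtered = [a - skip for i, a in enumerate(ordinals) if i not in skip_indexes]
--     return [set(filtered[j::period]) for j in range(period)]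
-- ===== Notes on version B (the rewrite author's own statement) =====
-- stated objective: idiomatic
-- what changed: Replaces the single round-robin loop with a modular counter k by a two-pass shape: first filter the non-skipped values into one list, then build each bucket independently with a strided slice filtered[j::period].
import Mathlib
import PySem

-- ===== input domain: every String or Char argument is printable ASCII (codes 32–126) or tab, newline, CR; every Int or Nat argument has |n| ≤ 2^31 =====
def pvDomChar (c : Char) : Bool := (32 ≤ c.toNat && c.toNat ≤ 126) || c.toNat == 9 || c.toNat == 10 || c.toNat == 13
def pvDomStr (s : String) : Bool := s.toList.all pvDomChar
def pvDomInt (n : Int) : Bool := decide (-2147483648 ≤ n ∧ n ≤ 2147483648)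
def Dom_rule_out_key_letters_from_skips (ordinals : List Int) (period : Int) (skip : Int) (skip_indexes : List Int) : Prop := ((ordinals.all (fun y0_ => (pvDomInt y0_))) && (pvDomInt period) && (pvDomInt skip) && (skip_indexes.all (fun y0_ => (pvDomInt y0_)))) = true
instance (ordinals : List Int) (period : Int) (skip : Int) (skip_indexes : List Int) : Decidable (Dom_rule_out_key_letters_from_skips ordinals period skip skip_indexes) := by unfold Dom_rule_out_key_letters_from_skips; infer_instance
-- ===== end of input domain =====

-- B rebuilds the buckets idiomatically: filter the non-skipped values once, then fill each
-- bucket by a strided slice filtered[j::period] instead of A's in-loop modular counter.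

-- ===== PORT A =====
-- the body of A's for-loop: state = (result, k)
def pvStepA (period skip : Int) (skip_indexes : List Int)
    (st : List (List Int) × Int) (ia : Int × Int) : List (List Int) × Int :=
  if skip_indexes.contains ia.1 then st
  else
    -- result[k].add(a - skip); within Pre_ the index k is always in range (0 ≤ k < period)
    (st.1.set st.2.toNat (PySem.Set.add (st.1.getD st.2.toNat []) (ia.2 - skip)),
     PySem.Int.mod (st.2 + 1) period)

def rule_out_key_letters_from_skips (ordinals : List Int) (period : Int) (skip : Int) (skip_indexes : List Int) : List (List Int) :=
  ((PySem.List.enumerate ordinals).foldl (pvStepA period skip skip_indexes)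
    ((PySem.List.pyRange 0 period 1).map (fun _ => (PySem.Set.empty : PySem.Set Int)), 0)).1

-- ===== PORT B =====
def rule_out_key_letters_from_skips_alt (ordinals : List Int) (period : Int) (skip : Int) (skip_indexes : List Int) : List (List Int) :=
  let filtered : List Int := (PySem.List.enumerate ordinals).filterMap
    (fun ia => if skip_indexes.contains ia.1 then none else some (ia.2 - skip))
  -- filtered[j::period]: every j drawn from range(period) has period ≥ 1 ≠ 0, so slice? is never none
  (PySem.List.pyRange 0 period 1).map
    (fun j => PySem.Set.ofList ((PySem.List.slice? filtered (some j) none period).getD []))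

-- ===== PRECONDITION & SPEC =====
-- Pre_ excludes exactly the inputs where A raises IndexError: period ≤ 0 (so result == [])
-- while some index of ordinals is not skipped, making result[0] fail.
def Pre_rule_out_key_letters_from_skips (ordinals : List Int) (period : Int) (skip : Int) (skip_indexes : List Int) : Prop :=
  0 < period ∨ ∀ i : Nat, i < ordinals.length → (i : Int) ∈ skip_indexes
instance (ordinals : List Int) (period : Int) (skip : Int) (skip_indexes : List Int) : Decidable (Pre_rule_out_key_letters_from_skips ordinals period skip skip_indexes) := by unfold Pre_rule_out_key_letters_from_skips; infer_instance

def pvWitness_rule_out_key_letters_from_skips : List Int × Int × Int × List Int := ([3, 7, 2, 7], 2, 1, [1])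

def Spec_rule_out_key_letters_from_skips (ordinals : List Int) (period : Int) (skip : Int) (skip_indexes : List Int) (out : List (List Int)) : Prop := out = rule_out_key_letters_from_skips_alt ordinals period skip skip_indexes
instance (ordinals : List Int) (period : Int) (skip : Int) (skip_indexes : List Int) (out : List (List Int)) : Decidable (Spec_rule_out_key_letters_from_skips ordinals period skip skip_indexes out) := by unfold Spec_rule_out_key_letters_from_skips; infer_instance

-- ===== CLAIM (what is proved, stated in full; the proofs are below) =====
def Claim_equal_rule_out_key_letters_from_skips : Prop := ∀ (ordinals : List Int) (period : Int) (skip : Int) (skip_indexes : List Int), Dom_rule_out_key_letters_from_skips ordinals period skip skip_indexes → Pre_rule_out_key_letters_from_skips ordinals period skip skip_indexes → Spec_rule_out_key_letters_from_skips ordinals period skip skip_indexes (rule_out_key_letters_from_skips ordinals period skip skip_indexes)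

-- ===== LEMMAS AND PROOFS =====

-- stride p xs = xs[::p]  (every p-th element, starting with the head)
def pvStride (p : Nat) : List Int → List Int
  | [] => []
  | x :: xs => x :: pvStride p (xs.drop (p - 1))
termination_by xs => xs.length
decreasing_by rw [List.length_drop]; simp only [List.length_cons]; omega

-- the filtered-value step of A's loop (the un-skipped branch of pvStepA)
def pvG (period : Int) (st : List (List Int) × Int) (v : Int) : List (List Int) × Int :=
  (st.1.set st.2.toNat (PySem.Set.add (st.1.getD st.2.toNat []) v),
   PySem.Int.mod (st.2 + 1) period)

theorem pvStepA_eq (period skip : Int) (si : List Int) (st : List (List Int) × Int) (ia : Int × Int) :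
    pvStepA period skip si st ia = if si.contains ia.1 then st else pvG period st (ia.2 - skip) := by
  simp [pvStepA, pvG]

-- A's fold over enumerate equals the pvG-fold over the filtered list
theorem pvFoldA_eq_foldG (period skip : Int) (si : List Int) :
    ∀ (xs : List Int) (s : Int) (st : List (List Int) × Int),
      (PySem.List.enumerate xs s).foldl (pvStepA period skip si) st =
      ((PySem.List.enumerate xs s).filterMap
        (fun ia => if si.contains ia.1 then none else some (ia.2 - skip))).foldl (pvG period) st := by
  intro xs
  induction xs with
  | nil => intro s st; simp [PySem.List.enumerate_nil]
  | cons x xs ih =>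
    intro s st
    rw [PySem.List.enumerate_cons]
    by_cases h : s ∈ si
    · simp [List.foldl_cons, List.filterMap_cons, h, pvStepA_eq, ih]
    · simp [List.foldl_cons, List.filterMap_cons, h, pvStepA_eq, ih]

theorem pvMod2 (x p : Nat) (hp : 0 < p) (hx : x < 2 * p) :
    x % p = if x < p then x else x - p := by
  split
  · exact Nat.mod_eq_of_lt (by assumption)
  · rw [Nat.mod_eq_sub_mod (by omega), Nat.mod_eq_of_lt (by omega)]

-- the fold keeps the length of result
theorem pvFoldG_length (period : Int) :
    ∀ (f : List Int) (result : List (List Int)) (k : Int),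
      ((f.foldl (pvG period) (result, k)).1).length = result.length := by
  intro f
  induction f with
  | nil => intro result k; simp
  | cons v f ih => intro result k; simp [List.foldl_cons, pvG, ih]

-- main invariant: after folding f with counter k, bucket j holds its old content plus the
-- stride of f starting at offset (j - k) mod p
theorem pvFoldG_getElem (period : Int) (p : Nat) (hp : 0 < p) (hper : period = (p : Int)) :
    ∀ (f : List Int) (result : List (List Int)) (k : Nat)
      (hlen : result.length = p) (hk : k < p) (j : Nat) (hj : j < p),
        ((f.foldl (pvG period) (result, (k : Int))).1)[j]'(by
            rw [pvFoldG_length]; omega) =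
        List.foldl PySem.Set.add (result[j]'(by omega)) (pvStride p (f.drop ((j + p - k) % p))) := by
  intro f
  induction f with
  | nil =>
    intro result k hlen hk j hj
    simp [pvStride]
  | cons x f ih =>
    intro result k hlen hk j hj
    have hkt : ((k : Int)).toNat = k := by omega
    have hmod : PySem.Int.mod ((k : Int) + 1) period = (((k + 1) % p : Nat) : Int) := by
      rw [hper, PySem.Int.mod_eq_emod_of_pos (by exact_mod_cast hp)]
      push_cast
      rfl
    have hgetD : (result[k]?).getD [] = result[k]'(by omega) := by
      rw [List.getElem?_eq_getElem (by omega)]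
      rfl
    have hstep : pvG period (result, (k : Int)) x =
        (result.set k (PySem.Set.add (result[k]'(by omega)) x), (((k + 1) % p : Nat) : Int)) := by
      simp [pvG, hkt, hmod, hgetD]
    simp only [List.foldl_cons, hstep]
    have hk' : (k + 1) % p < p := Nat.mod_lt _ hp
    have hlen' : (result.set k (PySem.Set.add (result[k]'(by omega)) x)).length = p := by
      simp [hlen]
    rw [ih _ _ hlen' hk' j hj]
    by_cases hjk : j = k
    · subst hjk
      have h1 : (j + p - j) % p = 0 := by
        have : j + p - j = p := by omega
        simp [this]
      have h2 : (j + p - (j + 1) % p) % p = p - 1 := by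
        rcases Nat.lt_or_ge (j + 1) p with h | h
        · rw [Nat.mod_eq_of_lt h, pvMod2 _ _ hp (by omega)]
          split <;> omega
        · have hj1 : j + 1 = p := by omega
          rw [hj1, Nat.mod_self, pvMod2 _ _ hp (by omega)]
          split <;> omega
      rw [h1, h2]
      simp only [List.drop_zero, List.getElem_set_self]
      show _ = List.foldl _ _ (pvStride p (x :: f))
      rw [pvStride]
      simp [List.foldl_cons]
    · have hget : (result.set k (PySem.Set.add (result[k]'(by omega)) x))[j]'(by omega) =
          result[j]'(by omega) := List.getElem_set_ne (by omega) _
      rw [hget]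
      have hr : (j + p - k) % p = if j + p - k < p then j + p - k else j - k := by
        rw [pvMod2 _ _ hp (by omega)]; split <;> omega
      have hrpos : 1 ≤ (j + p - k) % p ∧ (j + p - k) % p < p := by
        constructor
        · rw [hr]; split <;> omega
        · exact Nat.mod_lt _ hp
      have h2 : (j + p - (k + 1) % p) % p = (j + p - k) % p - 1 := by
        rcases Nat.lt_or_ge (k + 1) p with h | h
        · rw [Nat.mod_eq_of_lt h, pvMod2 _ _ hp (by omega), hr]
          split <;> split <;> omega
        · have hk1 : k + 1 = p := by omega
          rw [hk1, Nat.mod_self, pvMod2 _ _ hp (by omega), hr]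
          split <;> split <;> omega
      rw [h2]
      congr 1
      have : (x :: f).drop ((j + p - k) % p) = f.drop ((j + p - k) % p - 1) := by
        rcases Nat.exists_eq_add_of_le hrpos.1 with ⟨m, hm⟩
        rw [hm]
        simp [Nat.add_comm 1 m]
      rw [this]

-- pvStride as the explicit index form used by slice?
theorem pvStride_eq_filterMap :
    ∀ (xs : List Int) (p : Nat), 0 < p →
      pvStride p xs = (List.range ((xs.length + p - 1) / p)).filterMap (fun k => xs[(p * k)]?) := by
  intro xs p hp
  induction hn : xs.length using Nat.strong_induction_on generalizing xs with
  | _ n ih =>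
    cases xs with
    | nil => simp [pvStride]
    | cons x t =>
      have hc : (t.length + 1 + p - 1) / p = t.length / p + 1 := by
        have : t.length + 1 + p - 1 = t.length + p := by omega
        rw [this, Nat.add_div_right _ hp]
      rw [pvStride]
      have hrec := ih ((t.drop (p - 1)).length) (by subst hn; rw [List.length_drop]; simp only [List.length_cons]; omega) (t.drop (p - 1)) rfl
      rw [hrec]
      have hlen2 : ((t.drop (p - 1)).length + p - 1) / p = t.length / p := by
        rcases Nat.lt_or_ge t.length (p - 1) with h | h
        · rw [List.length_drop]
          have h1 : t.length - (p - 1) = 0 := by omega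
          rw [h1, Nat.zero_add, Nat.div_eq_of_lt (by omega), Nat.div_eq_of_lt (by omega)]
        · rw [List.length_drop]
          congr 1
          omega
      rw [hlen2]
      show x :: _ = _
      rw [← hn]
      simp only [List.length_cons, hc, List.range_succ_eq_map, List.filterMap_cons,
        List.filterMap_map]
      have h0 : (x :: t)[p * 0]? = some x := by simp
      rw [h0]
      congr 1
      apply List.filterMap_congr
      intro k _
      show (t.drop (p - 1))[p * k]? = ((fun k => (x :: t)[p * k]?) ∘ Nat.succ) k
      simp only [Function.comp_apply, Nat.succ_eq_add_one]
      have h1 : p * (k + 1) = (p - 1 + p * k) + 1 := by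
        have h : p * (k + 1) = p * k + p := Nat.mul_succ p k
        omega
      rw [List.getElem?_drop, h1, List.getElem?_cons_succ]

-- slice? with nonnegative start, no stop, positive step is pvStride of a drop
theorem pvSlice?_eq_stride (xs : List Int) (j p : Nat) (hp : 0 < p) :
    PySem.List.slice? xs (some (j : Int)) none (p : Int) = some (pvStride p (xs.drop j)) := by
  have hp0 : ((p : Int)) ≠ 0 := by omega
  have hpneg : ¬ ((p : Int) < 0) := by omega
  have hjneg : ¬ ((j : Int) < 0) := by omega
  simp only [PySem.List.slice?, PySem.List.sliceIndices, if_neg hp0, if_neg hpneg, if_neg hjneg]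
  rw [if_pos (by omega : (0 : Int) < (p : Int))]
  rcases Nat.lt_or_ge j xs.length with h | h
  · have hmin : min (j : Int) (xs.length : Int) = j := by omega
    rw [hmin, if_pos (by omega : (j : Int) < (xs.length : Int))]
    have hc1 : ((xs.length : Int) - j + p - 1) = ((xs.length - j + p - 1 : Nat) : Int) := by
      push_cast; omega
    have hcount : ((((xs.length : Int) - j + p - 1)) / p).toNat = ((xs.drop j).length + p - 1) / p := by
      rw [hc1]
      rw [show ((xs.length - j + p - 1 : Nat) : Int) / (p : Int) = (((xs.length - j + p - 1) / p : Nat) : Int) from by exact_mod_cast rfl]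
      rw [Int.toNat_natCast, List.length_drop]
    rw [hcount, pvStride_eq_filterMap _ _ hp]
    congr 1
    apply List.filterMap_congr
    intro k _
    have hidx : ((j : Int) + p * k).toNat = j + p * k := by push_cast; omega
    rw [hidx, List.getElem?_drop]
  · have hmin : min (j : Int) (xs.length : Int) = (xs.length : Int) := by omega
    rw [hmin, if_neg (by omega : ¬ ((xs.length : Int) < (xs.length : Int)))]
    rw [List.drop_eq_nil_of_le h]
    simp [pvStride]

-- if every index is skipped, the filtered list is empty
theorem pvFiltered_nil (si : List Int) (skip : Int) :
    ∀ (xs : List Int) (s : Int), (∀ i : Nat, i < xs.length → (s + (i : Int)) ∈ si) →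
      (PySem.List.enumerate xs s).filterMap
        (fun ia => if si.contains ia.1 then none else some (ia.2 - skip)) = [] := by
  intro xs
  induction xs with
  | nil => intro s _; simp [PySem.List.enumerate_nil]
  | cons x t ih =>
    intro s h
    rw [PySem.List.enumerate_cons, List.filterMap_cons]
    have h0 : s ∈ si := by simpa using h 0 (by simp)
    have hnone : (if si.contains s = true then (none : Option Int) else some (x - skip)) = none := by
      simp [h0]
    simp only [List.filterMap_cons, hnone]
    apply ih
    intro i hi
    have h2 := h (i + 1) (by simp only [List.length_cons]; omega)
    have he : s + 1 + (i : Int) = s + ((i + 1 : Nat) : Int) := by push_cast; ring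
    rw [he]
    exact h2

theorem rule_out_key_letters_from_skips_spec : Claim_equal_rule_out_key_letters_from_skips := by
  unfold Claim_equal_rule_out_key_letters_from_skips
  intro ordinals period skip si _ hpre
  unfold Spec_rule_out_key_letters_from_skips
  simp only [rule_out_key_letters_from_skips, rule_out_key_letters_from_skips_alt]
  rw [pvFoldA_eq_foldG]
  rcases hpre with hper | hall
  · -- 0 < period : the round-robin fold fills bucket j with the j-th stride
    have hp : 0 < period.toNat := by omega
    have hper2 : period = (period.toNat : Int) := by omega
    have hlen : ((PySem.List.pyRange 0 period 1).map
        (fun _ => (PySem.Set.empty : PySem.Set Int))).length = period.toNat := by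
      rw [List.length_map, PySem.List.length_pyRange_one]
      omega
    apply List.ext_getElem
    · rw [pvFoldG_length, hlen, List.length_map, PySem.List.length_pyRange_one]
      omega
    · intro j h1 h2
      have hj : j < period.toNat := by
        rw [pvFoldG_length, hlen] at h1
        exact h1
      have hmain := pvFoldG_getElem period period.toNat hp hper2
        ((PySem.List.enumerate ordinals).filterMap
          (fun ia => if si.contains ia.1 then none else some (ia.2 - skip)))
        ((PySem.List.pyRange 0 period 1).map (fun _ => (PySem.Set.empty : PySem.Set Int)))
        0 hlen hp j hj
      rw [Nat.cast_zero] at hmain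
      rw [hmain]
      have hdrop : (j + period.toNat - 0) % period.toNat = j := by
        rw [Nat.sub_zero, Nat.add_mod_right, Nat.mod_eq_of_lt hj]
      rw [hdrop]
      have hinit : ((PySem.List.pyRange 0 period 1).map
          (fun _ => (PySem.Set.empty : PySem.Set Int)))[j]'(by omega) = ([] : List Int) := by
        rw [List.getElem_map]
        rfl
      rw [hinit]
      rw [List.getElem_map, PySem.List.getElem_pyRange_one, zero_add]
      rw [hper2, pvSlice?_eq_stride _ j period.toNat hp, Option.getD_some]
      rw [PySem.Set.ofList_eq_foldl, Int.toNat_natCast]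
  · -- period ≤ 0 would raise unless every index is skipped: then both sides are []
    rw [pvFiltered_nil si skip ordinals 0 (by intro i hi; simpa using hall i hi)]
    by_cases hper : 0 < period
    · -- still fine: empty filtered list, buckets all stay empty
      have hp : 0 < period.toNat := by omega
      have hper2 : period = (period.toNat : Int) := by omega
      apply List.ext_getElem
      · simp
      · intro j h1 h2
        simp only [List.foldl_nil]
        rw [List.getElem_map, List.getElem_map, PySem.List.getElem_pyRange_one, zero_add]
        rw [hper2, pvSlice?_eq_stride _ j period.toNat hp, Option.getD_some]
        simp [pvStride, PySem.Set.ofList, PySem.Set.empty]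
    · rw [PySem.List.pyRange_one_eq_nil (by omega)]
      simp
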